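-- pv_equiv track=rewrite | github.com/xavierbower/TranslationScope | backend/sequence_screener.py | screen_signal_peptide
-- ===== SOURCE A (Python) =====
-- CODON_TABLE = {
--     "UUU": "F", "UUC": "F", "UUA": "L", "UUG": "L",
--     "CUU": "L", "CUC": "L", "CUA": "L", "CUG": "L",
--     "AUU": "I", "AUC": "I", "AUA": "I", "AUG": "M",
--     "GUU": "V", "GUC": "V", "GUA": "V", "GUG": "V",
--     "UCU": "S", "UCC": "S", "UCA": "S", "UCG": "S",
--     "CCU": "P", "CCC": "P", "CCA": "P", "CCG": "P",
--     "ACU": "T", "ACC": "T", "ACA": "T", "ACG": "T",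
--     "GCU": "A", "GCC": "A", "GCA": "A", "GCG": "A",
--     "UAU": "Y", "UAC": "Y", "UAA": "*", "UAG": "*",
--     "CAU": "H", "CAC": "H", "CAA": "Q", "CAG": "Q",
--     "AAU": "N", "AAC": "N", "AAA": "K", "AAG": "K",
--     "GAU": "D", "GAC": "D", "GAA": "E", "GAG": "E",
--     "UGU": "C", "UGC": "C", "UGA": "*", "UGG": "W",
--     "CGU": "R", "CGC": "R", "CGA": "R", "CGG": "R",
--     "AGU": "S", "AGC": "S", "AGA": "R", "AGG": "R",
--     "GGU": "G", "GGC": "G", "GGA": "G", "GGG": "G",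
-- }
--
-- HYDROPHOBIC = set("LIVFMA")
--
-- POSITIVE_CHARGE = set("KR")
--
-- def translate_rna(rna: str) -> str:
--     """Translate RNA sequence to amino acid string."""
--     aa = []
--     for i in range(0, len(rna) - 2, 3):
--         codon = rna[i:i + 3]
--         residue = CODON_TABLE.get(codon, "X")
--         if residue == "*":
--             break
--         aa.append(residue)
--     return "".join(aa)
--
-- def screen_signal_peptide(cds_rna: str) -> bool:
--     """Check first 30 amino acids for signal peptide characteristics."""
--     if len(cds_rna) < 90:
--         return False
--     aa = translate_rna(cds_rna[:90])
--     if len(aa) < 15: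
--         return False
--
--     # Look for n-region (1-5 aa after Met, may contain K/R) then h-region (7+ hydrophobic)
--     # Start scanning from position 1 (after start Met)
--     for n_end in range(1, min(7, len(aa))):
--         n_region = aa[1:n_end + 1]
--         if not any(r in POSITIVE_CHARGE for r in n_region):
--             continue
--         # Look for hydrophobic stretch starting after n-region
--         best_h = 0
--         current_h = 0
--         for i in range(n_end + 1, min(n_end + 21, len(aa))):
--             if aa[i] in HYDROPHOBIC:
--                 current_h += 1
--                 best_h = max(best_h, current_h)
--             else:
--                 current_h = 0
--         if best_h >= 7:
--             return True
--     return False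
-- ===== SOURCE B (Python) =====
-- # B: the outer n_end loop and inner best/current counting are replaced by one closed-form
-- # test: find the FIRST positive residue p in positions 1..6, then a single scan with a
-- # run counter checks for a hydrophobic run of >=7 ending at any index in [p+7, min(27,len)).
-- # translate_rna is restaged: build all residues, then cut at the first stop codon.
-- # Objective: alternative (single fused scan instead of up to 6 window re-scans).
--
-- CODON_TABLE = {
--     "UUU": "F", "UUC": "F", "UUA": "L", "UUG": "L",
--     "CUU": "L", "CUC": "L", "CUA": "L", "CUG": "L",
--     "AUU": "I", "AUC": "I", "AUA": "I", "AUG": "M",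
--     "GUU": "V", "GUC": "V", "GUA": "V", "GUG": "V",
--     "UCU": "S", "UCC": "S", "UCA": "S", "UCG": "S",
--     "CCU": "P", "CCC": "P", "CCA": "P", "CCG": "P",
--     "ACU": "T", "ACC": "T", "ACA": "T", "ACG": "T",
--     "GCU": "A", "GCC": "A", "GCA": "A", "GCG": "A",
--     "UAU": "Y", "UAC": "Y", "UAA": "*", "UAG": "*",
--     "CAU": "H", "CAC": "H", "CAA": "Q", "CAG": "Q",
--     "AAU": "N", "AAC": "N", "AAA": "K", "AAG": "K",
--     "GAU": "D", "GAC": "D", "GAA": "E", "GAG": "E",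
--     "UGU": "C", "UGC": "C", "UGA": "*", "UGG": "W",
--     "CGU": "R", "CGC": "R", "CGA": "R", "CGG": "R",
--     "AGU": "S", "AGC": "S", "AGA": "R", "AGG": "R",
--     "GGU": "G", "GGC": "G", "GGA": "G", "GGG": "G",
-- }
--
-- HYDROPHOBIC = set("LIVFMA")
-- POSITIVE_CHARGE = set("KR")
--
-- def translate_rna(rna: str) -> str:
--     """Translate RNA to amino acids: all residues first, then cut at the first stop."""
--     residues = "".join(CODON_TABLE.get(rna[i:i + 3], "X") for i in range(0, len(rna) - 2, 3))
--     star = residues.find("*")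
--     return residues if star == -1 else residues[:star]
--
-- def screen_signal_peptide(cds_rna: str) -> bool:
--     if len(cds_rna) < 90:
--         return False
--     aa = translate_rna(cds_rna[:90])
--     if len(aa) < 15:
--         return False
--     # first positively charged residue after the start Met (positions 1..6)
--     p = next((k for k in range(1, 7) if aa[k] in POSITIVE_CHARGE), None)
--     if p is None:
--         return False
--     # a hydrophobic run of >= 7 ending at index i >= p+7 lies fully inside some
--     # admissible window [n+1, n+21) with p <= n <= 6, since i < 27 forces i-20 <= 6
--     run = 0
--     for i in range(min(27, len(aa))):
--         run = run + 1 if aa[i] in HYDROPHOBIC else 0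
--         if i >= p + 7 and run >= 7:
--             return True
--     return False
-- ===== Notes on version B (the rewrite author's own statement) =====
-- stated objective: alternative
-- what changed: A's outer loop over six candidate n-region ends, each re-scanning a 20-residue window with a best/current run counter, is replaced by a closed form: find the first positively charged position p in 1..6, then a single run-counter scan over the prefix checks for a hydrophobic run of >=7 ending at any index in [p+7, min(27,len)); translate_rna is restaged as build-all-residues then cut at the first stop.
import Mathlib
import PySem

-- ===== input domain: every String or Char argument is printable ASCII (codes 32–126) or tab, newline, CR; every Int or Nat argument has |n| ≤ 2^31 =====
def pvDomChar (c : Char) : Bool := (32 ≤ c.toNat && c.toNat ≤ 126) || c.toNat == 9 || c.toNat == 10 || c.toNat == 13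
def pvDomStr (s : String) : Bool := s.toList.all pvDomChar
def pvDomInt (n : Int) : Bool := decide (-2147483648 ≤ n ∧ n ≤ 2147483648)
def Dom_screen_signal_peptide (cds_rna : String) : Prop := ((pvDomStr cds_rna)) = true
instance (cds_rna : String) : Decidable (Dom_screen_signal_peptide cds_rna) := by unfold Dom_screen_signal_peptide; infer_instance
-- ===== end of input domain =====

-- B removes A's outer n_end loop and its per-window best/current re-scans: it finds the
-- FIRST positive position p in 1..6 and does ONE run-counter scan; translate is restaged
-- as build-all-residues then cut at the first stop (objective: alternative).

-- ===== PORT A =====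

-- module constants shared by Source A and Source B
def codonTable : PySem.Dict String Char := PySem.Dict.ofList [
  ("UUU", 'F'), ("UUC", 'F'), ("UUA", 'L'), ("UUG", 'L'),
  ("CUU", 'L'), ("CUC", 'L'), ("CUA", 'L'), ("CUG", 'L'),
  ("AUU", 'I'), ("AUC", 'I'), ("AUA", 'I'), ("AUG", 'M'),
  ("GUU", 'V'), ("GUC", 'V'), ("GUA", 'V'), ("GUG", 'V'),
  ("UCU", 'S'), ("UCC", 'S'), ("UCA", 'S'), ("UCG", 'S'),
  ("CCU", 'P'), ("CCC", 'P'), ("CCA", 'P'), ("CCG", 'P'),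
  ("ACU", 'T'), ("ACC", 'T'), ("ACA", 'T'), ("ACG", 'T'),
  ("GCU", 'A'), ("GCC", 'A'), ("GCA", 'A'), ("GCG", 'A'),
  ("UAU", 'Y'), ("UAC", 'Y'), ("UAA", '*'), ("UAG", '*'),
  ("CAU", 'H'), ("CAC", 'H'), ("CAA", 'Q'), ("CAG", 'Q'),
  ("AAU", 'N'), ("AAC", 'N'), ("AAA", 'K'), ("AAG", 'K'),
  ("GAU", 'D'), ("GAC", 'D'), ("GAA", 'E'), ("GAG", 'E'),
  ("UGU", 'C'), ("UGC", 'C'), ("UGA", '*'), ("UGG", 'W'),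
  ("CGU", 'R'), ("CGC", 'R'), ("CGA", 'R'), ("CGG", 'R'),
  ("AGU", 'S'), ("AGC", 'S'), ("AGA", 'R'), ("AGG", 'R'),
  ("GGU", 'G'), ("GGC", 'G'), ("GGA", 'G'), ("GGG", 'G')]

def pyHyd (c : Char) : Bool := ['L', 'I', 'V', 'F', 'M', 'A'].contains c
def pyPos (c : Char) : Bool := ['K', 'R'].contains c

-- A's translate_rna: the index loop 'for i in range(0, len(rna)-2, 3)' reads the 3-char
-- chunks of rna in order and stops at '*' or when fewer than 3 chars remain — ported as
-- chunk recursion over the same chunks (exact).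
def translateGo : List Char → List Char
  | a :: b :: c :: rest =>
    let residue := codonTable.getD (String.ofList [a, b, c]) 'X'
    if residue = '*' then [] else residue :: translateGo rest
  | _ => []

def translate_rna (rna : List Char) : List Char := translateGo rna

-- A's outer loop: 'for n_end in range(1, min(7, len(aa)))'; the inner loop
-- 'for i in range(n_end+1, min(n_end+21, len(aa)))' reads exactly the elements of
-- aa[n_end+1 : n_end+21] in order (indices in range — exact)
def loopA (aa : List Char) (n_end : Nat) : Bool :=
  if h : n_end < min 7 aa.length then
    if ((aa.drop 1).take n_end).any pyPos then
      let best := (((aa.drop (n_end + 1)).take 20).foldl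
        (fun (p : Nat × Nat) c =>
          if pyHyd c then (max p.1 (p.2 + 1), p.2 + 1) else (p.1, 0)) (0, 0)).1
      if 7 ≤ best then true else loopA aa (n_end + 1)
    else loopA aa (n_end + 1)
  else false
termination_by 7 - n_end
decreasing_by all_goals omega

def screen_signal_peptide (cds_rna : String) : Bool :=
  if cds_rna.toList.length < 90 then false
  else if (translate_rna (cds_rna.toList.take 90)).length < 15 then false
  else loopA (translate_rna (cds_rna.toList.take 90)) 1

-- ===== PORT B =====

-- Source B's translate_rna: all residues first (the comprehension reads the 3-char chunks),
-- then cut at the first '*' (str.find + slice)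
def codons3 : List Char → List (Char × Char × Char)
  | a :: b :: c :: rest => (a, b, c) :: codons3 rest
  | _ => []

def residuesB (rna : List Char) : List Char :=
  (codons3 rna).map (fun t => codonTable.getD (String.ofList [t.1, t.2.1, t.2.2]) 'X')

def translateB (rna : List Char) : List Char :=
  match (residuesB rna).findIdx? (· == '*') with
  | none => residuesB rna
  | some k => (residuesB rna).take k

-- Source B's 'next((k for k in range(1, 7) if aa[k] in POSITIVE_CHARGE), None)'
-- (indices 1..6 are in range since len(aa) >= 15 — getD is exact there)
def firstPosB (aa : List Char) : Option Nat :=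
  (List.range' 1 6).find? (fun k => pyPos (aa.getD k 'X'))

-- Source B's single scan 'for i in range(min(27, len(aa)))' with the run counter
-- (index i in range — getD is exact)
def scanB (aa : List Char) (p : Nat) (run i : Nat) : Bool :=
  if h : i < min 27 aa.length then
    let run' := if pyHyd (aa.getD i 'X') then run + 1 else 0
    if p + 7 ≤ i ∧ 7 ≤ run' then true else scanB aa p run' (i + 1)
  else false
termination_by min 27 aa.length - i
decreasing_by omega

def screen_signal_peptide_alt (cds_rna : String) : Bool :=
  if cds_rna.toList.length < 90 then false
  else if (translateB (cds_rna.toList.take 90)).length < 15 then false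
  else match firstPosB (translateB (cds_rna.toList.take 90)) with
    | none => false
    | some p => scanB (translateB (cds_rna.toList.take 90)) p 0 0

-- ===== PRECONDITION & SPEC =====
def Spec_screen_signal_peptide (cds_rna : String) (out : Bool) : Prop := out = screen_signal_peptide_alt cds_rna
instance (cds_rna : String) (out : Bool) : Decidable (Spec_screen_signal_peptide cds_rna out) := by unfold Spec_screen_signal_peptide; infer_instance

-- ===== CLAIM (what is proved, stated in full; the proofs are below) =====
def Claim_equal_screen_signal_peptide : Prop := ∀ (cds_rna : String), Dom_screen_signal_peptide cds_rna → Spec_screen_signal_peptide cds_rna (screen_signal_peptide cds_rna)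

-- ===== LEMMAS AND PROOFS =====

-- run-length list: sruns c xs = lengths of the hydrophobic run ending at each position,
-- where c is the length of the run in progress just before xs
def sruns (c : Nat) : List Char → List Nat
  | [] => []
  | x :: xs =>
    let r := if pyHyd x then c + 1 else 0
    r :: sruns r xs

def strail (c : Nat) (xs : List Char) : Nat :=
  xs.foldl (fun r x => if pyHyd x then r + 1 else 0) c

theorem sruns_length (c : Nat) (xs : List Char) : (sruns c xs).length = xs.length := by
  induction xs generalizing c with
  | nil => rfl
  | cons x xs ih => simp [sruns, ih]

theorem foldA_eq (W : List Char) : ∀ (b c : Nat),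
    ((W.foldl (fun (p : Nat × Nat) ch =>
      if pyHyd ch then (max p.1 (p.2 + 1), p.2 + 1) else (p.1, 0)) (b, c)).1)
    = max b ((sruns c W).foldr max 0) := by
  induction W with
  | nil => intro b c; simp [sruns]
  | cons x xs ih =>
    intro b c
    simp only [List.foldl, sruns]
    by_cases h : pyHyd x
    · rw [if_pos h, if_pos h, ih]
      simp only [List.foldr]
      omega
    · rw [if_neg h, if_neg h, ih]
      simp only [List.foldr]
      omega

theorem sruns_seed (xs : List Char) : ∀ (c j : Nat), j < xs.length →
    (sruns c xs).getD j 0 =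
      if ((xs.take (j + 1)).all pyHyd) then c + (j + 1) else (sruns 0 xs).getD j 0 := by
  induction xs with
  | nil => intro c j h; simp at h
  | cons x xs ih =>
    intro c j h
    cases j with
    | zero =>
      by_cases hx : pyHyd x <;> simp [sruns, hx]
    | succ j =>
      have hj : j < xs.length := by simpa using h
      by_cases hx : pyHyd x
      · have l1 : (sruns c (x :: xs)).getD (j + 1) 0 = (sruns (c + 1) xs).getD j 0 := by
          simp [sruns, hx]
        have l2 : (sruns 0 (x :: xs)).getD (j + 1) 0 = (sruns 1 xs).getD j 0 := by
          simp [sruns, hx]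
        have l3 : ((x :: xs).take (j + 1 + 1)).all pyHyd = (xs.take (j + 1)).all pyHyd := by
          simp [hx]
        rw [l1, l2, l3, ih (c + 1) j hj, ih 1 j hj]
        by_cases hall : (xs.take (j + 1)).all pyHyd = true
        · rw [if_pos hall, if_pos hall]; omega
        · rw [if_neg hall, if_neg hall, if_neg hall]
      · have l1 : (sruns c (x :: xs)).getD (j + 1) 0 = (sruns 0 xs).getD j 0 := by
          simp [sruns, hx]
        have l2 : (sruns 0 (x :: xs)).getD (j + 1) 0 = (sruns 0 xs).getD j 0 := by
          simp [sruns, hx]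
        have l3 : ((x :: xs).take (j + 1 + 1)).all pyHyd = false := by
          simp [hx]
        rw [l1, l2, l3]
        simp

theorem sruns_bound (xs : List Char) : ∀ (c j : Nat), (sruns c xs).getD j 0 ≤ c + j + 1 := by
  induction xs with
  | nil => intro c j; simp [sruns]
  | cons x xs ih =>
    intro c j
    cases j with
    | zero => by_cases hx : pyHyd x <;> simp [sruns, hx]
    | succ j =>
      have h1 := ih (c + 1) j
      have h0 := ih 0 j
      by_cases hx : pyHyd x
      · have hr : (sruns c (x :: xs)).getD (j + 1) 0 = (sruns (c + 1) xs).getD j 0 := by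
          simp [sruns, hx]
        rw [hr]; omega
      · have hr : (sruns c (x :: xs)).getD (j + 1) 0 = (sruns 0 xs).getD j 0 := by
          simp [sruns, hx]
        rw [hr]; omega

theorem sruns_append (u : List Char) : ∀ (v : List Char) (c : Nat),
    sruns c (u ++ v) = sruns c u ++ sruns (strail c u) v := by
  induction u with
  | nil => intro v c; simp [sruns, strail]
  | cons x u ih =>
    intro v c
    simp only [List.cons_append, sruns, strail, List.foldl]
    rw [ih]
    rfl

theorem sruns_take (xs : List Char) : ∀ (n : Nat) (c : Nat),
    sruns c (xs.take n) = (sruns c xs).take n := by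
  induction xs with
  | nil => intro n c; simp [sruns]
  | cons x xs ih =>
    intro n c
    cases n with
    | zero => simp [sruns]
    | succ n => simp [sruns, ih]

theorem maxlist_ge7 (l : List Nat) :
    7 ≤ l.foldr max 0 ↔ ∃ j, j < l.length ∧ 7 ≤ l.getD j 0 := by
  induction l with
  | nil => simp
  | cons x xs ih =>
    simp only [List.foldr]
    constructor
    · intro h
      rcases le_max_iff.mp h with h | h
      · exact ⟨0, by simp, by simpa using h⟩
      · rcases ih.mp h with ⟨j, hj, hg⟩
        exact ⟨j + 1, by simpa using hj, by simpa using hg⟩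
    · rintro ⟨j, hj, hg⟩
      cases j with
      | zero => simp at hg; omega
      | succ j =>
        have : 7 ≤ xs.foldr max 0 := ih.mpr ⟨j, by simpa using hj, by simpa using hg⟩
        omega

theorem getD_append_right (u v : List Nat) (j : Nat) :
    (u ++ v).getD (u.length + j) 0 = v.getD j 0 := by
  simp [List.getD_eq_getElem?_getD, List.getElem?_append_right (Nat.le_add_right u.length j)]

theorem getD_take (l : List Nat) (n j : Nat) (h : j < n) :
    (l.take n).getD j 0 = l.getD j 0 := by
  simp [List.getD_eq_getElem?_getD, h]

-- A's best-run-in-window test equals a membership test on the global run table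
theorem window_iff (aa : List Char) (n : Nat) (hs : n + 1 ≤ aa.length) :
    (7 ≤ ((sruns 0 ((aa.drop (n + 1)).take 20)).foldr max 0))
    ↔ (∃ i, n + 7 ≤ i ∧ i < min (n + 21) aa.length ∧ 7 ≤ (sruns 0 aa).getD i 0) := by
  set s := n + 1 with hsdef
  set D := aa.drop s with hD
  set cs := strail 0 (aa.take s) with hcs
  have hDlen : D.length = aa.length - s := by simp [hD]
  have hWruns : sruns 0 (D.take 20) = (sruns 0 D).take 20 := sruns_take D 20 0
  have hsplit : sruns 0 aa = sruns 0 (aa.take s) ++ sruns cs D := by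
    rw [hcs, ← sruns_append, List.take_append_drop]
  have hlen1 : (sruns 0 (aa.take s)).length = s := by
    rw [sruns_length]; simp; omega
  have hgetg : ∀ j, (sruns 0 aa).getD (s + j) 0 = (sruns cs D).getD j 0 := by
    intro j
    have h := getD_append_right (sruns 0 (aa.take s)) (sruns cs D) j
    rw [hlen1] at h
    rw [hsplit]
    exact h
  constructor
  · intro h
    rcases (maxlist_ge7 _).mp h with ⟨j, hj, hg⟩
    rw [hWruns] at hj hg
    have hjlen : j < (sruns 0 D).length := by
      simp [List.length_take] at hj; omega
    have hj20 : j < 20 := by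
      simp [List.length_take] at hj; omega
    rw [getD_take _ _ _ hj20] at hg
    have hjD : j < D.length := by rwa [sruns_length] at hjlen
    have hj6 : 6 ≤ j := by
      have := sruns_bound D 0 j
      omega
    refine ⟨s + j, by omega, ?_, ?_⟩
    · simp [List.length_take, sruns_length, hDlen] at hj
      omega
    · rw [hgetg]
      rw [sruns_seed D cs j hjD]
      rw [sruns_seed D 0 j hjD] at hg
      by_cases hall : (D.take (j + 1)).all pyHyd = true
      · simp [hall]; omega
      · simp [hall] at hg ⊢; exact hg
  · rintro ⟨i, hi1, hi2, hg⟩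
    have hjdef : i = s + (i - s) := by omega
    set j := i - s with hjd
    rw [hjdef, hgetg] at hg
    have hjD : j < D.length := by omega
    have hj20 : j < 20 := by omega
    rw [sruns_seed D cs j hjD] at hg
    have hg0 : 7 ≤ (sruns 0 D).getD j 0 := by
      rw [sruns_seed D 0 j hjD]
      by_cases hall : (D.take (j + 1)).all pyHyd = true
      · simp [hall]; omega
      · simp [hall] at hg ⊢; exact hg
    apply (maxlist_ge7 _).mpr
    refine ⟨j, ?_, ?_⟩
    · rw [hWruns]
      simp [List.length_take, sruns_length]
      omega
    · rw [hWruns, getD_take _ _ _ hj20]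
      exact hg0

-- characterisation of A's outer loop
theorem loopA_iff (aa : List Char) : ∀ (k n : Nat), n + k = 7 →
    (loopA aa n = true ↔ ∃ m, n ≤ m ∧ m < min 7 aa.length ∧
      ((aa.drop 1).take m).any pyPos = true ∧
      ∃ i, m + 7 ≤ i ∧ i < min (m + 21) aa.length ∧ 7 ≤ (sruns 0 aa).getD i 0) := by
  intro k
  induction k with
  | zero =>
    intro n hn
    rw [loopA]
    have hng : ¬ n < min 7 aa.length := by omega
    simp only [hng, dite_false]
    constructor
    · intro h; exact absurd h (by simp)
    · rintro ⟨m, h1, h2, _⟩; omega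
  | succ k ih =>
    intro n hn
    rw [loopA]
    by_cases hg : n < min 7 aa.length
    · rw [dif_pos hg]
      have hrec := ih (n + 1) (by omega)
      by_cases hpos : ((aa.drop 1).take n).any pyPos = true
      · simp only [hpos, if_true]
        have hbest : (((aa.drop (n + 1)).take 20).foldl
            (fun (p : Nat × Nat) c =>
              if pyHyd c then (max p.1 (p.2 + 1), p.2 + 1) else (p.1, 0)) (0, 0)).1
            = (sruns 0 ((aa.drop (n + 1)).take 20)).foldr max 0 := by
          rw [foldA_eq]; omega
        by_cases h7 : 7 ≤ (((aa.drop (n + 1)).take 20).foldl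
            (fun (p : Nat × Nat) c =>
              if pyHyd c then (max p.1 (p.2 + 1), p.2 + 1) else (p.1, 0)) (0, 0)).1
        · rw [if_pos h7]
          constructor
          · intro _
            refine ⟨n, le_refl _, hg, hpos, ?_⟩
            rw [hbest] at h7
            exact (window_iff aa n (by omega)).mp h7
          · intro _; rfl
        · rw [if_neg h7, hrec]
          constructor
          · rintro ⟨m, h1, h2, h3, h4⟩; exact ⟨m, by omega, h2, h3, h4⟩
          · rintro ⟨m, h1, h2, h3, h4⟩
            rcases Nat.eq_or_lt_of_le h1 with heq | hlt
            · exfalso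
              apply h7
              rw [hbest, heq]
              exact (window_iff aa m (by omega)).mpr h4
            · exact ⟨m, by omega, h2, h3, h4⟩
      · have hpf : ((aa.drop 1).take n).any pyPos = false := by simpa using hpos
        rw [hpf, if_neg (by simp), hrec]
        constructor
        · rintro ⟨m, h1, h2, h3, h4⟩; exact ⟨m, by omega, h2, h3, h4⟩
        · rintro ⟨m, h1, h2, h3, h4⟩
          rcases Nat.eq_or_lt_of_le h1 with heq | hlt
          · exfalso; rw [heq] at hpos; exact hpos h3
          · exact ⟨m, by omega, h2, h3, h4⟩
    · rw [dif_neg hg]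
      constructor
      · intro h; exact absurd h (by simp)
      · rintro ⟨m, h1, h2, _⟩; omega

-- B's translate equals A's translate
theorem findIdx_cut (rs : List Char) :
    (match rs.findIdx? (· == '*') with
      | none => rs
      | some k => rs.take k)
    = rs.takeWhile (fun c => !(c == '*')) := by
  induction rs with
  | nil => simp
  | cons x xs ih =>
    by_cases hx : x = '*'
    · subst hx
      simp [List.findIdx?_cons, List.takeWhile]
    · have hb : (x == '*') = false := by simp [hx]
      simp only [List.findIdx?_cons, hb, List.takeWhile, Bool.not_false]
      cases h : xs.findIdx? (· == '*') with
      | none => simp [h] at ih ⊢; exact ih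
      | some k => simp [h] at ih ⊢; exact ih

theorem translateGo_takeWhile (rna : List Char) :
    translateGo rna = (residuesB rna).takeWhile (fun c => !(c == '*')) := by
  induction rna using codons3.induct with
  | case1 a b c rest ih =>
    simp only [translateGo, residuesB, codons3, List.map, List.takeWhile]
    by_cases h : codonTable.getD (String.ofList [a, b, c]) 'X' = '*'
    · simp [h]
    · simp only [h, if_false]
      have hb : (codonTable.getD (String.ofList [a, b, c]) 'X' == '*') = false := by simp [h]
      simp [hb]
      exact ih
  | case2 x hx =>
    cases x with
    | nil => rfl
    | cons a t =>
      cases t with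
      | nil => rfl
      | cons b t2 =>
        cases t2 with
        | nil => rfl
        | cons c r => exact absurd rfl (hx a b c r)

theorem translateB_eq (rna : List Char) : translateB rna = translate_rna rna := by
  rw [translate_rna, translateGo_takeWhile, translateB]
  exact findIdx_cut (residuesB rna)

-- run value of Source B's counter at position i
theorem sruns_getD_strail (xs : List Char) : ∀ (c i : Nat), i < xs.length →
    (sruns c xs).getD i 0 = strail c (xs.take (i + 1)) := by
  induction xs with
  | nil => intro c i h; simp at h
  | cons x xs ih =>
    intro c i h
    cases i with
    | zero => by_cases hx : pyHyd x <;> simp [sruns, strail, hx]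
    | succ i =>
      have hi : i < xs.length := by simpa using h
      have hget : (sruns c (x :: xs)).getD (i + 1) 0
          = (sruns (if pyHyd x then c + 1 else 0) xs).getD i 0 := by
        by_cases hx : pyHyd x <;> simp [sruns, hx]
      have hstep : strail c ((x :: xs).take (i + 1 + 1))
          = strail (if pyHyd x then c + 1 else 0) (xs.take (i + 1)) := by
        simp [strail]
      rw [hget, hstep, ih _ i hi]

theorem strail_snoc (aa : List Char) (i : Nat) (h : i < aa.length) :
    strail 0 (aa.take (i + 1))
    = (if pyHyd (aa.getD i 'X') then strail 0 (aa.take i) + 1 else 0) := by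
  have hsplit : aa.take (i + 1) = aa.take i ++ [aa[i]] := by
    rw [List.take_add_one, List.getElem?_eq_getElem h]
    rfl
  have hgd : aa.getD i 'X' = aa[i] := by
    simp [List.getD_eq_getElem?_getD, List.getElem?_eq_getElem h]
  rw [hsplit, hgd, strail, List.foldl_append]
  rfl

-- characterisation of B's scan
theorem scanB_iff (aa : List Char) (p : Nat) : ∀ (k i : Nat), i + k = min 27 aa.length →
    (scanB aa p (strail 0 (aa.take i)) i = true ↔
      ∃ j, i ≤ j ∧ j < min 27 aa.length ∧ p + 7 ≤ j ∧ 7 ≤ (sruns 0 aa).getD j 0) := by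
  intro k
  induction k with
  | zero =>
    intro i hi
    rw [scanB]
    have hng : ¬ i < min 27 aa.length := by omega
    simp only [hng, dite_false]
    constructor
    · intro h; exact absurd h (by simp)
    · rintro ⟨j, h1, h2, _⟩; omega
  | succ k ih =>
    intro i hi
    have hlt : i < min 27 aa.length := by omega
    have hilen : i < aa.length := by omega
    rw [scanB, dif_pos hlt]
    have hrun : (if pyHyd (aa.getD i 'X') then strail 0 (aa.take i) + 1 else 0)
        = (sruns 0 aa).getD i 0 := by
      rw [sruns_getD_strail aa 0 i hilen, strail_snoc aa i hilen]
    by_cases hc : p + 7 ≤ i ∧ 7 ≤ (if pyHyd (aa.getD i 'X') then strail 0 (aa.take i) + 1 else 0)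
    · rw [if_pos hc]
      constructor
      · intro _
        exact ⟨i, le_refl _, hlt, hc.1, by rw [← hrun]; exact hc.2⟩
      · intro _; rfl
    · rw [if_neg hc]
      have hnext : (if pyHyd (aa.getD i 'X') then strail 0 (aa.take i) + 1 else 0)
          = strail 0 (aa.take (i + 1)) := (strail_snoc aa i hilen).symm
      rw [hnext, ih (i + 1) (by omega)]
      constructor
      · rintro ⟨j, h1, h2, h3, h4⟩; exact ⟨j, by omega, h2, h3, h4⟩
      · rintro ⟨j, h1, h2, h3, h4⟩
        rcases Nat.eq_or_lt_of_le h1 with heq | hlt2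
        · exfalso
          apply hc
          subst heq
          rw [hrun]
          exact ⟨h3, h4⟩
        · exact ⟨j, by omega, h2, h3, h4⟩

-- find? over a range of indices: none / some with minimality
theorem find_range_none {f : Nat → Bool} {s n : Nat}
    (h : (List.range' s n).find? f = none) :
    ∀ k, s ≤ k → k < s + n → f k = false := by
  intro k h1 h2
  have := List.find?_eq_none.mp h k (by rw [List.mem_range'_1]; omega)
  simpa using this

theorem find_range_some {f : Nat → Bool} : ∀ (n s p : Nat),
    (List.range' s n).find? f = some p →
    f p = true ∧ s ≤ p ∧ p < s + n ∧ ∀ k, s ≤ k → k < p → f k = false := by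
  intro n
  induction n with
  | zero => intro s p h; simp [List.range'] at h
  | succ n ih =>
    intro s p h
    rw [List.range'] at h
    by_cases hs : f s = true
    · rw [List.find?_cons_of_pos hs] at h
      cases h
      exact ⟨hs, le_refl _, by omega, fun k h1 h2 => by omega⟩
    · rw [List.find?_cons_of_neg (by simpa using hs)] at h
      obtain ⟨hf, h1, h2, hmin⟩ := ih (s + 1) p h
      refine ⟨hf, by omega, by omega, fun k hk1 hk2 => ?_⟩
      by_cases hks : k = s
      · subst hks; simpa using hs
      · exact hmin k (by omega) hk2

-- A's n-region test in terms of positions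
theorem posAny_iff (aa : List Char) (m : Nat) (hm : m + 1 ≤ aa.length) :
    (((aa.drop 1).take m).any pyPos = true) ↔
      ∃ j, 1 ≤ j ∧ j ≤ m ∧ j < aa.length ∧ pyPos (aa.getD j 'X') = true := by
  rw [List.any_eq_true]
  constructor
  · rintro ⟨x, hmem, hx⟩
    rw [List.mem_iff_getElem] at hmem
    obtain ⟨i, hilt, hieq⟩ := hmem
    have hlen : i < m ∧ 1 + i < aa.length := by
      simp [List.length_take] at hilt; omega
    refine ⟨1 + i, by omega, by omega, by omega, ?_⟩
    have hxeq : x = aa[1 + i]'hlen.2 := by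
      rw [← hieq]
      simp only [List.getElem_take, List.getElem_drop]
    rw [List.getD_eq_getElem?_getD, List.getElem?_eq_getElem hlen.2]
    rw [hxeq] at hx
    simpa using hx
  · rintro ⟨j, h1, h2, h3, hp⟩
    refine ⟨aa[j]'h3, ?_, ?_⟩
    · rw [List.mem_iff_getElem]
      have hjl : j - 1 < ((aa.drop 1).take m).length := by
        simp [List.length_take]; omega
      refine ⟨j - 1, hjl, ?_⟩
      simp only [List.getElem_take, List.getElem_drop]
      all_goals congr 1
      all_goals omega
    · rw [List.getD_eq_getElem?_getD, List.getElem?_eq_getElem h3] at hp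
      simpa using hp

-- main bridge: A's searched loop equals B's first-positive + single scan, for len >= 15
theorem main_eq (aa : List Char) (h15 : 15 ≤ aa.length) :
    loopA aa 1 = (match firstPosB aa with
      | none => false
      | some p => scanB aa p 0 0) := by
  cases hfp : firstPosB aa with
  | none =>
    have hnone := find_range_none (f := fun k => pyPos (aa.getD k 'X'))
      (by rw [firstPosB] at hfp; exact hfp)
    cases hA : loopA aa 1 with
    | false => rfl
    | true =>
      exfalso
      obtain ⟨m, hm1, hm2, hpos, _⟩ := (loopA_iff aa 6 1 rfl).mp hA
      obtain ⟨j, hj1, hj2, hj3, hpj⟩ := (posAny_iff aa m (by omega)).mp hpos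
      have hjf : pyPos (aa.getD j 'X') = false := hnone j hj1 (by omega)
      rw [hjf] at hpj
      exact Bool.noConfusion hpj
  | some p =>
    obtain ⟨hfpP, hp1, hp2, hpmin⟩ := find_range_some 6 1 p
      (by rw [firstPosB] at hfp; exact hfp)
    have hfpP' : pyPos (aa.getD p 'X') = true := hfpP
    have hscan := scanB_iff aa p (min 27 aa.length) 0 (by omega)
    simp only [List.take_zero] at hscan
    have hstrail0 : strail 0 ([] : List Char) = 0 := rfl
    rw [hstrail0] at hscan
    apply Bool.eq_iff_iff.mpr
    rw [hscan, loopA_iff aa 6 1 rfl]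
    constructor
    · rintro ⟨m, hm1, hm2, hpos, i, hi1, hi2, hi3⟩
      obtain ⟨j, hj1, hj2, hj3, hpj⟩ := (posAny_iff aa m (by omega)).mp hpos
      have hpj' : p ≤ j := by
        by_contra hlt
        have hfj : pyPos (aa.getD j 'X') = false := hpmin j hj1 (by omega)
        rw [hfj] at hpj
        exact Bool.noConfusion hpj
      exact ⟨i, by omega, by omega, by omega, hi3⟩
    · rintro ⟨j, _, hj2, hj3, hj4⟩
      refine ⟨max p (j - 20), by omega, by omega, ?_, j, by omega, by omega, hj4⟩
      exact (posAny_iff aa (max p (j - 20)) (by omega)).mpr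
        ⟨p, hp1, by omega, by omega, hfpP'⟩

-- ===== VERDICT (by name: the statement is the Claim_ definition above) =====
theorem screen_signal_peptide_spec : Claim_equal_screen_signal_peptide := by
  intro cds_rna _
  unfold Spec_screen_signal_peptide screen_signal_peptide screen_signal_peptide_alt
  rw [translateB_eq]
  by_cases h90 : cds_rna.toList.length < 90
  · rw [if_pos h90, if_pos h90]
  · rw [if_neg h90, if_neg h90]
    by_cases h15 : (translate_rna (cds_rna.toList.take 90)).length < 15
    · rw [if_pos h15, if_pos h15]
    · rw [if_neg h15, if_neg h15]
      exact main_eq _ (by omega)
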